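-- pv_equiv track=rewrite | github.com/prody/ProDy | prody/utilities/laptools.py | expand_nodes
-- ===== SOURCE A (Python) =====
-- def expand_nodes(node):
--     includes0, excludes0, solution = node
--
--     pairs = []
--     R, C = solution
--     for r, c in zip(R, C):
--         pairs.append((r, c))
--
--     nodes = []; previous_pairs = []
--     for i, pair in enumerate(pairs):
--         if i == len(pairs) - 1:
--             continue
--         if pair in includes0:
--             continue
--         if pair in excludes0: # unlikely
--             raise ValueError('%s should be excluded'%str(pair))
--
--         includes = list(includes0)
--         includes.extend(previous_pairs)
--
--         excludes = list(excludes0)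
--         excludes.append(pair)
--
--         nodes.append([includes, excludes, None])
--         previous_pairs.append(pair)
--
--     return nodes
-- ===== SOURCE B (Python) =====
-- def expand_nodes(node):
--     includes0, excludes0, (R, C) = node
--     pairs = list(zip(R, C))[:-1]
--     for p in pairs:
--         if p in excludes0 and p not in includes0:
--             raise ValueError('%s should be excluded' % str(p))
--     active = [p for p in pairs if p not in includes0]
--     # build the children back-to-front: the prefix shrinks by one pair per node
--     prefix = list(includes0) + active
--     nodes = []
--     for p in reversed(active):
--         prefix = prefix[:-1]
--         nodes.append([prefix, list(excludes0) + [p], None])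
--     nodes.reverse()
--     return nodes
-- ===== Notes on version B (the rewrite author's own statement) =====
-- stated objective: alternative
-- what changed: B replaces A's single forward loop with dual accumulators (nodes, previous_pairs) by staged passes: a validation pass, a filter producing the active pairs, and a backwards construction that builds the children back-to-front by shrinking a shared prefix list one pair at a time, reversing at the end.
import Mathlib
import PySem

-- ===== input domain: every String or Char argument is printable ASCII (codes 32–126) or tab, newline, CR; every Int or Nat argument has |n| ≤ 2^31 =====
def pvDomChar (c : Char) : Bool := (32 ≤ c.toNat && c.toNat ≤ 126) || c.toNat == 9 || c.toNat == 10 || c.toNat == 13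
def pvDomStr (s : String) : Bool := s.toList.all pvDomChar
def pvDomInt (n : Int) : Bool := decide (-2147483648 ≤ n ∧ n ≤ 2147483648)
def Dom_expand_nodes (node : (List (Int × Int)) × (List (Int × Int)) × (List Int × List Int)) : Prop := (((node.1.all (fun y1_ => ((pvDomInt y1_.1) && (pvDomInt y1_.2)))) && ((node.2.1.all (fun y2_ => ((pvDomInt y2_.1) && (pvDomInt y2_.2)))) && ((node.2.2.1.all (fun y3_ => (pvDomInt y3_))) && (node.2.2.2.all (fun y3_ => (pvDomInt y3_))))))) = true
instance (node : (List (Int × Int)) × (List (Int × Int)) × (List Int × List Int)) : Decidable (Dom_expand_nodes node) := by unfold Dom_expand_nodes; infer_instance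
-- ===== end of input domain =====

-- B builds the children back-to-front from a pre-filtered active list, shrinking one shared
-- prefix instead of A's forward loop with dual accumulators; objective: alternative (same cost).

-- ===== PORT A =====
def expand_nodes (node : (List (Int × Int)) × (List (Int × Int)) × (List Int × List Int)) : List (List (Option (List (Int × Int)))) :=
  let includes0 := node.1
  let excludes0 := node.2.1
  let R := node.2.2.1
  let C := node.2.2.2
  let pairs := R.zip C
  let res := (PySem.List.enumerate pairs).foldl
    (fun (st : List (List (Option (List (Int × Int)))) × List (Int × Int)) ip =>
      if ip.1 = (pairs.length : Int) - 1 then st        -- `continue` on the last pair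
      else if ip.2 ∈ includes0 then st                   -- `continue`
      else if ip.2 ∈ excludes0 then st                   -- Python raises ValueError here; such inputs are outside Pre_
      else
        (st.1 ++ [[some (includes0 ++ st.2), some (excludes0 ++ [ip.2]), none]],
         st.2 ++ [ip.2]))
    ([], [])
  res.1

-- ===== PORT B =====
def expand_nodes_alt (node : (List (Int × Int)) × (List (Int × Int)) × (List Int × List Int)) : List (List (Option (List (Int × Int)))) :=
  let includes0 := node.1
  let excludes0 := node.2.1
  -- pairs = list(zip(R, C))[:-1]: List.dropLast is exact for the slice [:-1]
  let pairs := (node.2.2.1.zip node.2.2.2).dropLast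
  -- validation pass: Python raises ValueError on a pair in excludes0 but not includes0;
  -- such inputs are outside Pre_, so the pass has no effect on the returned value
  let active := pairs.filter (fun p => decide (p ∉ includes0))
  -- back-to-front: prefix = includes0 + active, then shrink by one per child, reverse at the end
  let res := active.reverse.foldl
    (fun (st : List (Int × Int) × List (List (Option (List (Int × Int))))) p =>
      (st.1.dropLast,
       st.2 ++ [[some st.1.dropLast, some (excludes0 ++ [p]), none]]))
    (includes0 ++ active, [])
  res.2.reverse

-- ===== PRECONDITION & SPEC =====
-- Pre_ excludes exactly the inputs on which the Python A raises ValueError: a non-last pair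
-- that lies in excludes0 without lying in includes0 (B raises there too).
def Pre_expand_nodes (node : (List (Int × Int)) × (List (Int × Int)) × (List Int × List Int)) : Prop :=
  ∀ p ∈ (node.2.2.1.zip node.2.2.2).dropLast, p ∈ node.2.1 → p ∈ node.1
instance (node : (List (Int × Int)) × (List (Int × Int)) × (List Int × List Int)) : Decidable (Pre_expand_nodes node) := by unfold Pre_expand_nodes; infer_instance

def pvWitness_expand_nodes : ((List (Int × Int)) × (List (Int × Int)) × (List Int × List Int)) :=
  ([], [], ([1, 2, 3], [4, 5, 6]))

def Spec_expand_nodes (node : (List (Int × Int)) × (List (Int × Int)) × (List Int × List Int)) (out : List (List (Option (List (Int × Int))))) : Prop := out = expand_nodes_alt node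
instance (node : (List (Int × Int)) × (List (Int × Int)) × (List Int × List Int)) (out : List (List (Option (List (Int × Int))))) : Decidable (Spec_expand_nodes node out) := by unfold Spec_expand_nodes; infer_instance

-- ===== CLAIM (what is proved, stated in full; the proofs are below) =====
def Claim_equal_expand_nodes : Prop := ∀ (node : (List (Int × Int)) × (List (Int × Int)) × (List Int × List Int)), Dom_expand_nodes node → Pre_expand_nodes node → Spec_expand_nodes node (expand_nodes node)

-- ===== LEMMAS AND PROOFS =====

-- the kept ("active") pairs of a list, with A's check order
def pvFilt (inc exc : List (Int × Int)) : List (Int × Int) → List (Int × Int)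
  | [] => []
  | p :: L => if p ∈ inc then pvFilt inc exc L
              else if p ∈ exc then pvFilt inc exc L
              else p :: pvFilt inc exc L

-- the nodes produced from a list of active pairs, given the already-accumulated prefix
def pvBmap (inc exc : List (Int × Int)) (prev : List (Int × Int)) : List (Int × Int) → List (List (Option (List (Int × Int))))
  | [] => []
  | p :: L => [some (inc ++ prev), some (exc ++ [p]), none] :: pvBmap inc exc (prev ++ [p]) L

-- under Pre_ (no kept pair in exc), pvFilt is the plain filter B uses
theorem pvFilt_eq_filter (inc exc : List (Int × Int)) :
    ∀ L : List (Int × Int), (∀ p ∈ L, p ∈ exc → p ∈ inc) →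
      pvFilt inc exc L = L.filter (fun p => decide (p ∉ inc)) := by
  intro L
  induction L with
  | nil => intro _; simp [pvFilt]
  | cons p L ih =>
    intro h
    have hL : ∀ q ∈ L, q ∈ exc → q ∈ inc := fun q hq => h q (List.mem_cons_of_mem _ hq)
    by_cases h1 : p ∈ inc
    · simp [pvFilt, h1, ih hL]
    · have h2 : p ∉ exc := fun hx => h1 (h p (List.mem_cons_self) hx)
      simp [pvFilt, h1, h2, ih hL]

-- appending one pair to the active list appends one node
theorem pvBmap_concat (inc exc : List (Int × Int)) :
    ∀ (L : List (Int × Int)) (prev : List (Int × Int)) (p : Int × Int),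
      pvBmap inc exc prev (L ++ [p])
      = pvBmap inc exc prev L ++ [[some (inc ++ (prev ++ L)), some (exc ++ [p]), none]] := by
  intro L
  induction L with
  | nil => intro prev p; simp [pvBmap]
  | cons q L ih =>
    intro prev p
    simp only [List.cons_append, pvBmap, ih (prev ++ [q]) p, List.append_assoc,
      List.cons_append, List.nil_append]

-- B's backwards fold, characterised: fold over M starting from prefix inc ++ M.reverse
theorem pvRevLoop (inc exc : List (Int × Int)) :
    ∀ (M : List (Int × Int)) (ns : List (List (Option (List (Int × Int))))),
      M.foldl
        (fun (st : List (Int × Int) × List (List (Option (List (Int × Int))))) p =>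
          (st.1.dropLast,
           st.2 ++ [[some st.1.dropLast, some (exc ++ [p]), none]]))
        (inc ++ M.reverse, ns)
      = (inc, ns ++ (pvBmap inc exc [] M.reverse).reverse) := by
  intro M
  induction M with
  | nil => intro ns; simp [pvBmap]
  | cons p M ih =>
    intro ns
    have hdrop : (inc ++ (M.reverse ++ [p])).dropLast = inc ++ M.reverse := by
      rw [← List.append_assoc, List.dropLast_concat]
    simp only [List.foldl_cons, List.reverse_cons, hdrop]
    rw [ih (ns ++ [[some (inc ++ M.reverse), some (exc ++ [p]), none]])]
    rw [pvBmap_concat, List.reverse_append]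
    simp

-- A's index-free loop body
def pvStepA (inc exc : List (Int × Int))
    (st : List (List (Option (List (Int × Int)))) × List (Int × Int)) (p : Int × Int) :
    List (List (Option (List (Int × Int)))) × List (Int × Int) :=
  if p ∈ inc then st
  else if p ∈ exc then st
  else (st.1 ++ [[some (inc ++ st.2), some (exc ++ [p]), none]], st.2 ++ [p])

-- main invariant of A's loop
theorem pvLoopA (inc exc : List (Int × Int)) :
    ∀ (L : List (Int × Int)) ns prev,
      L.foldl (pvStepA inc exc) (ns, prev)
      = (ns ++ pvBmap inc exc prev (pvFilt inc exc L), prev ++ pvFilt inc exc L) := by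
  intro L
  induction L with
  | nil => intro ns prev; simp [pvFilt, pvBmap]
  | cons p L ih =>
    intro ns prev
    simp only [List.foldl_cons, pvStepA, pvFilt]
    by_cases h1 : p ∈ inc
    · simp only [h1, if_pos]; exact ih ns prev
    · by_cases h2 : p ∈ exc
      · simp [h1, h2]; exact ih ns prev
      · simp only [h1, h2]
        rw [ih]
        simp [pvBmap]

-- A's fold over enumerate with the last-index skip = the index-free fold over dropLast
theorem pvStrip (inc exc : List (Int × Int)) (pairs : List (Int × Int)) :
    (PySem.List.enumerate pairs).foldl
      (fun (st : List (List (Option (List (Int × Int)))) × List (Int × Int)) ip =>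
        if ip.1 = (pairs.length : Int) - 1 then st
        else if ip.2 ∈ inc then st
        else if ip.2 ∈ exc then st
        else (st.1 ++ [[some (inc ++ st.2), some (exc ++ [ip.2]), none]], st.2 ++ [ip.2]))
      ([], [])
    = pairs.dropLast.foldl (pvStepA inc exc) ([], []) := by
  rcases eq_or_ne pairs [] with h | h
  · subst h; simp [PySem.List.enumerate]
  · have hsplit : pairs = pairs.dropLast ++ [pairs.getLast h] :=
      (List.dropLast_append_getLast h).symm
    set L := pairs.dropLast with hL
    have hlen : (pairs.length : Int) - 1 = (L.length : Int) := by
      rw [hsplit]; simp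
    rw [hlen]
    conv_lhs => rw [hsplit]
    rw [PySem.List.enumerate_append, List.foldl_append]
    rw [show (PySem.List.enumerate [pairs.getLast h] ((0 : Int) + L.length))
          = [((0 : Int) + L.length, pairs.getLast h)] by
        simp [PySem.List.enumerate_cons, PySem.List.enumerate_nil]]
    simp only [List.foldl_cons, List.foldl_nil]
    rw [if_pos (by ring)]
    -- inside enumerate L, every index is < L.length, so the skip branch never fires
    have hc : (PySem.List.enumerate L).foldl
        (fun (st : List (List (Option (List (Int × Int)))) × List (Int × Int)) ip =>
          if ip.1 = (L.length : Int) then st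
          else if ip.2 ∈ inc then st
          else if ip.2 ∈ exc then st
          else (st.1 ++ [[some (inc ++ st.2), some (exc ++ [ip.2]), none]], st.2 ++ [ip.2]))
        ([], [])
      = (PySem.List.enumerate L).foldl
        (fun (st : List (List (Option (List (Int × Int)))) × List (Int × Int)) ip =>
          pvStepA inc exc st ip.2) ([], []) := by
      apply PySem.List.foldl_congr_mem
      intro st ip hip
      rw [PySem.List.mem_enumerate_iff] at hip
      obtain ⟨k, hk, rfl⟩ := hip
      have hne : k ≠ L.length := by omega
      simp [hne, pvStepA]
    rw [hc,
      ← List.foldl_map (f := (Prod.snd : Int × (Int × Int) → Int × Int))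
        (g := pvStepA inc exc),
      PySem.List.map_snd_enumerate L 0]

-- ===== VERDICT (by name: the statement is the Claim_ definition above) =====
theorem expand_nodes_spec : Claim_equal_expand_nodes := by
  intro node _ hpre
  unfold Spec_expand_nodes
  simp only [expand_nodes, expand_nodes_alt]
  rw [pvStrip, pvLoopA]
  simp only [List.nil_append]
  have hfilt := pvFilt_eq_filter node.1 node.2.1 (node.2.2.1.zip node.2.2.2).dropLast hpre
  set A := (node.2.2.1.zip node.2.2.2).dropLast.filter (fun p => decide (p ∉ node.1)) with hA
  have := pvRevLoop node.1 node.2.1 A.reverse []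
  rw [List.reverse_reverse] at this
  rw [this]
  simp [hfilt]
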